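-- pv_equiv track=rewrite | github.com/amites/davinci_2017_spring | codewars/countdigits.py | find_longest
-- ===== SOURCE A (Python) =====
-- def find_longest(arr):
--     length = 0
--     position = 0
--     for i in range(0, len(arr)):
--         num_digits = len(str(arr[i]))
--         if num_digits > length:
--             position = i
--             length = num_digits
--     return arr[position]
-- ===== SOURCE B (Python) =====
-- def find_longest(arr):
--     return sorted(arr, key=lambda x: len(str(x)), reverse=True)[0]
-- ===== Notes on version B (the rewrite author's own statement) =====
-- stated objective: simpler
-- what changed: Replaces the explicit argmax index scan with a stable reverse sort by digit count and taking the first element (stability preserves first-wins ties).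
import Mathlib
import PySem

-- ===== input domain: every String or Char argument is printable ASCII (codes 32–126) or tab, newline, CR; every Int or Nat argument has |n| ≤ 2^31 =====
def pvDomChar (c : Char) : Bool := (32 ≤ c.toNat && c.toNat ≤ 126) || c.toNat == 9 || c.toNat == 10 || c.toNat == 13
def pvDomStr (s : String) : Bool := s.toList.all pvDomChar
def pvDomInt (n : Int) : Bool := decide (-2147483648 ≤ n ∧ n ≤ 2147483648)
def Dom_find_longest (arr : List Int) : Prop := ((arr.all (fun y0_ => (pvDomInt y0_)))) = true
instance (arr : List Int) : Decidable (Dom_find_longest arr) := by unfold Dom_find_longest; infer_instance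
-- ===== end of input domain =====

-- B replaces A's explicit argmax scan by a stable reverse sort on digit count and taking the head (simpler, not faster).
-- ===== PORT A =====
-- shared helper: the digit count len(str(x)) both Pythons compute
def pvKey (x : Int) : Int := PySem.Str.len (PySem.Int.toStr x)

def find_longest (arr : List Int) : Int :=
  let st :=
    (PySem.List.pyRange 0 (PySem.List.len arr) 1).foldl
      (fun (s : Int × Int) i =>
        let num_digits : Int := pvKey (PySem.List.pyGetD arr i 0)
        if num_digits > s.1 then (num_digits, i) else s)
      (0, 0)
  PySem.List.pyGetD arr st.2 0

-- ===== PORT B =====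
def find_longest_alt (arr : List Int) : Int :=
  PySem.List.pyGetD
    (PySem.List.sorted arr pvKey true) 0 0

-- ===== PRECONDITION & SPEC =====
-- Pre_ excludes exactly the empty list, on which both Pythons raise IndexError.
def Pre_find_longest (arr : List Int) : Prop := arr ≠ []
instance (arr : List Int) : Decidable (Pre_find_longest arr) := by unfold Pre_find_longest; infer_instance
def pvWitness_find_longest : List Int := ([3, -1234, 56])

def Spec_find_longest (arr : List Int) (out : Int) : Prop := out = find_longest_alt arr
instance (arr : List Int) (out : Int) : Decidable (Spec_find_longest arr out) := by unfold Spec_find_longest; infer_instance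

-- ===== CLAIM (what is proved, stated in full; the proofs are below) =====
def Claim_equal_find_longest : Prop := ∀ (arr : List Int), Dom_find_longest arr → Pre_find_longest arr → Spec_find_longest arr (find_longest arr)

-- ===== LEMMAS AND PROOFS =====

lemma pvKey_pos (x : Int) : 0 < pvKey x := by
  unfold pvKey
  rw [PySem.Str.len_eq, PySem.Int.toList_toStr]
  unfold PySem.Int.toChars
  split
  · simp
  · exact_mod_cast Nat.length_toDigits_pos

-- the common "first element with strictly more digits wins" scan
def pvScan (b : Int) (xs : List Int) : Int :=
  xs.foldl (fun c y => if pvKey c < pvKey y then y else c) b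

-- A-side: invariant of the index loop, phrased over `enumerate`
lemma pvLoopA (xs : List Int) : ∀ (s j b : Int) (arr : List Int),
    (∀ p ∈ PySem.List.enumerate xs s, PySem.List.pyGetD arr p.1 0 = p.2) →
    PySem.List.pyGetD arr j 0 = b →
    PySem.List.pyGetD arr
      ((PySem.List.enumerate xs s).foldl
        (fun (t : Int × Int) p => if pvKey p.2 > t.1 then (pvKey p.2, p.1) else t)
        (pvKey b, j)).2 0 = pvScan b xs := by
  induction xs with
  | nil => intro s j b arr _ hj; simpa [pvScan] using hj
  | cons x xs ih =>
    intro s j b arr hmem hj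
    rw [PySem.List.enumerate_cons]
    simp only [List.foldl_cons]
    have hx : PySem.List.pyGetD arr s 0 = x := by
      have := hmem (s, x) (by rw [PySem.List.enumerate_cons]; exact List.mem_cons_self)
      simpa using this
    have hmem' : ∀ p ∈ PySem.List.enumerate xs (s + 1), PySem.List.pyGetD arr p.1 0 = p.2 := by
      intro p hp; apply hmem; rw [PySem.List.enumerate_cons]; exact List.mem_cons_of_mem _ hp
    by_cases h : pvKey b < pvKey x
    · simp only [gt_iff_lt, h, if_pos, pvScan, List.foldl_cons]
      exact ih (s + 1) s x arr hmem' hx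
    · simp only [gt_iff_lt, h, if_neg, pvScan, List.foldl_cons, not_false_iff]
      exact ih (s + 1) j b arr hmem' hj

-- B-side: head of the insertion-sort fold is the same scan
lemma pvHeadIns (x h : Int) (t : List Int) :
    PySem.List.insertBy (fun a b => decide (pvKey b < pvKey a)) x (h :: t)
      = if pvKey h < pvKey x then x :: h :: t
        else h :: PySem.List.insertBy (fun a b => decide (pvKey b < pvKey a)) x t := by
  simp [PySem.List.insertBy]

lemma pvLoopB (xs : List Int) : ∀ (h : Int) (t : List Int),
    (xs.foldl
      (fun acc x => PySem.List.insertBy (fun a b => decide (pvKey b < pvKey a)) x acc)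
      (h :: t)).head? = some (pvScan h xs) := by
  induction xs with
  | nil => intro h t; simp [pvScan]
  | cons x xs ih =>
    intro h t
    simp only [List.foldl_cons, pvHeadIns]
    by_cases hc : pvKey h < pvKey x
    · simp only [hc, if_pos]
      rw [ih x (h :: t)]
      simp [pvScan, hc]
    · simp only [hc, if_neg, not_false_iff]
      cases he : PySem.List.insertBy (fun a b => decide (pvKey b < pvKey a)) x t with
      | nil =>
        exfalso
        have : x ∈ PySem.List.insertBy (fun a b => decide (pvKey b < pvKey a)) x t :=
          (PySem.List.mem_insertBy _ x x t).mpr (Or.inl rfl)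
        rw [he] at this; exact List.not_mem_nil this
      | cons y ys =>
        rw [ih h (y :: ys)]
        simp [pvScan, hc]

lemma pvA_eq (a : Int) (rest : List Int) :
    find_longest (a :: rest) = pvScan a rest := by
  unfold find_longest
  have hmap := PySem.List.enumerate_eq_map_pyRange (a :: rest) (0 : Int)
  simp only [gt_iff_lt]
  have hfold :
      (PySem.List.pyRange 0 (PySem.List.len (a :: rest)) 1).foldl
        (fun (s : Int × Int) i =>
          if s.1 < pvKey (PySem.List.pyGetD (a :: rest) i 0)
          then (pvKey (PySem.List.pyGetD (a :: rest) i 0), i) else s)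
        (0, 0)
      = (PySem.List.enumerate (a :: rest) 0).foldl
          (fun (t : Int × Int) p => if pvKey p.2 > t.1 then (pvKey p.2, p.1) else t)
          (0, 0) := by
    rw [hmap, List.foldl_map]
  rw [hfold, PySem.List.enumerate_cons]
  simp only [List.foldl_cons]
  have ha : PySem.List.pyGetD (a :: rest) (0 : Int) 0 = a := by
    simp [PySem.List.pyGetD]
  have h0 : pvKey a > (0 : Int) := pvKey_pos a
  simp only [gt_iff_lt, h0, if_pos]
  exact pvLoopA rest 1 0 a (a :: rest)
    (by intro p hp
        rcases (PySem.List.mem_enumerate_iff rest 1 p).mp hp with ⟨k, hk, rfl⟩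
        have : (1 : Int) + (k : Int) = ((k + 1 : Nat) : Int) := by push_cast; ring
        rw [this, PySem.List.pyGetD_natCast]
        simp [List.getElem?_eq_getElem hk]) ha

lemma pvB_eq (a : Int) (rest : List Int) :
    find_longest_alt (a :: rest) = pvScan a rest := by
  unfold find_longest_alt
  rw [PySem.List.sorted_rev_eq_foldl_insertBy (a :: rest) pvKey]
  simp only [List.foldl_cons]
  have h1 : PySem.List.insertBy (fun x b => decide (pvKey b < pvKey x)) a [] = [a] := by
    simp [PySem.List.insertBy]
  rw [h1]
  have hh := pvLoopB rest a []
  cases he : rest.foldl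
      (fun acc x => PySem.List.insertBy (fun a b => decide (pvKey b < pvKey a)) x acc)
      [a] with
  | nil => rw [he] at hh; simp at hh
  | cons y ys =>
    rw [he] at hh
    simp only [List.head?_cons, Option.some.injEq] at hh
    simp [PySem.List.pyGetD, hh]

-- ===== VERDICT (by name: the statement is the Claim_ definition above) =====
theorem find_longest_spec : Claim_equal_find_longest := by
  intro arr _ hpre
  unfold Spec_find_longest
  cases arr with
  | nil => exact absurd rfl hpre
  | cons a rest => rw [pvA_eq, pvB_eq]
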